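-- pv_equiv track=rewrite | github.com/viktorisup/Isupov_viktor_GU_puthon_2387 | task_05_03.py | gen_tuple
-- ===== SOURCE A (Python) =====
-- def gen_tuple(list_1, list_2):
--     i = 0
--     j = 0
--     while i < len(list_2) or j < len(list_1):
--         if j >= len(list_1):
--             yield (None, list_2[j])
--             i += 1
--             j += 1
--         elif i >= len(list_2):
--             yield (list_1[i], None)
--             i += 1
--             j += 1
--         else:
--             yield (list_1[i], list_2[j])
--             i += 1
--             j += 1
-- ===== SOURCE B (Python) =====
-- def gen_tuple(list_1, list_2):
--     n = max(len(list_1), len(list_2))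
--     a = list(list_1) + [None] * (n - len(list_1))
--     b = list(list_2) + [None] * (n - len(list_2))
--     yield from zip(a, b)
-- ===== Notes on version B (the rewrite author's own statement) =====
-- stated objective: idiomatic
-- what changed: B replaces A's index-driven while loop with three comparison branches by materializing two None-padded equal-length copies and doing one flat branch-free zip pass.
import Mathlib
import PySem

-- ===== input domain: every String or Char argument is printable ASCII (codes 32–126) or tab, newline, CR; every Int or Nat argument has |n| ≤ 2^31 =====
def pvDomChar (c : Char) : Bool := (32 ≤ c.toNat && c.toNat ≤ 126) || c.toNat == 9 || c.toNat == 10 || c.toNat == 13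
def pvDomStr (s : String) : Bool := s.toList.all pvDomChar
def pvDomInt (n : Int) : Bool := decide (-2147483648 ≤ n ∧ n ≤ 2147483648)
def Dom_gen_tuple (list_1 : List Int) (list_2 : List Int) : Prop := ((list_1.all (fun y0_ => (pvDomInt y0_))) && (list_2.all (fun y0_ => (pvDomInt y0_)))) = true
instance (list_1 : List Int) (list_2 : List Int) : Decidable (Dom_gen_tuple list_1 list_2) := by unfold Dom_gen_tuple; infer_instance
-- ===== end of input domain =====

-- B pads both lists with None to equal length and does one flat zip pass instead of A's
-- index-driven while loop with three branches (objective: idiomatic; equal cost).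


-- ===== PORT A =====
-- A's while loop over indices i, j (always equal, both start at 0, both +1 each turn),
-- with the three branches in source order; list_1[i]/list_2[j] via pyGet? (always in range here).
def gen_tuple_loop (list_1 : List Int) (list_2 : List Int) (i j : Nat) :
    List (Option Int × Option Int) :=
  if h : i < list_2.length ∨ j < list_1.length then
    (if j ≥ list_1.length then
       ((none : Option Int), PySem.List.pyGet? list_2 (j : Int))
     else if i ≥ list_2.length then
       ((PySem.List.pyGet? list_1 (i : Int)), none)
     else
       ((PySem.List.pyGet? list_1 (i : Int)), (PySem.List.pyGet? list_2 (j : Int))))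
    :: gen_tuple_loop list_1 list_2 (i + 1) (j + 1)
  else []
termination_by (list_2.length - i) + (list_1.length - j)
decreasing_by omega

def gen_tuple (list_1 : List Int) (list_2 : List Int) : List (Option Int × Option Int) :=
  gen_tuple_loop list_1 list_2 0 0

-- ===== PORT B =====
def gen_tuple_alt (list_1 : List Int) (list_2 : List Int) : List (Option Int × Option Int) :=
  let n := max list_1.length list_2.length
  let a := list_1.map some ++ List.replicate (n - list_1.length) (none : Option Int)
  let b := list_2.map some ++ List.replicate (n - list_2.length) (none : Option Int)
  a.zip b

-- ===== PRECONDITION & SPEC =====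
def Spec_gen_tuple (list_1 : List Int) (list_2 : List Int) (out : List (Option Int × Option Int)) : Prop := out = gen_tuple_alt list_1 list_2
instance (list_1 : List Int) (list_2 : List Int) (out : List (Option Int × Option Int)) : Decidable (Spec_gen_tuple list_1 list_2 out) := by unfold Spec_gen_tuple; infer_instance

-- ===== CLAIM (what is proved, stated in full; the proofs are below) =====
def Claim_equal_gen_tuple : Prop := ∀ (list_1 : List Int) (list_2 : List Int), Dom_gen_tuple list_1 list_2 → Spec_gen_tuple list_1 list_2 (gen_tuple list_1 list_2)

-- ===== LEMMAS AND PROOFS =====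

-- At equal indices i = j = k, A's loop produces exactly the zip of B's padded lists dropped at k.
theorem gen_tuple_loop_eq (l1 l2 : List Int) (k : Nat) :
    gen_tuple_loop l1 l2 k k =
      ((l1.map some ++ List.replicate (max l1.length l2.length - l1.length) (none : Option Int)).drop k).zip
      ((l2.map some ++ List.replicate (max l1.length l2.length - l2.length) (none : Option Int)).drop k) := by
  rw [gen_tuple_loop]
  by_cases h : k < l2.length ∨ k < l1.length
  · rw [dif_pos h]
    rw [gen_tuple_loop_eq l1 l2 (k + 1)]
    have hk1 : k < (l1.map some ++ List.replicate (max l1.length l2.length - l1.length) (none : Option Int)).length := by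
      simp; omega
    have hk2 : k < (l2.map some ++ List.replicate (max l1.length l2.length - l2.length) (none : Option Int)).length := by
      simp; omega
    rw [List.drop_eq_getElem_cons hk1, List.drop_eq_getElem_cons hk2, List.zip_cons_cons]
    congr 1
    have e1 : (l1.map some ++ List.replicate (max l1.length l2.length - l1.length) (none : Option Int))[k] =
        if k < l1.length then some l1[k]! else none := by
      split
      · rename_i hlt
        rw [List.getElem_append_left (by simpa using hlt)]
        simp [List.getElem!_eq_getElem?_getD, List.getElem?_eq_getElem hlt]
      · rename_i hge
        rw [List.getElem_append_right (by simpa using hge)]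
        simp
    have e2 : (l2.map some ++ List.replicate (max l1.length l2.length - l2.length) (none : Option Int))[k] =
        if k < l2.length then some l2[k]! else none := by
      split
      · rename_i hlt
        rw [List.getElem_append_left (by simpa using hlt)]
        simp [List.getElem!_eq_getElem?_getD, List.getElem?_eq_getElem hlt]
      · rename_i hge
        rw [List.getElem_append_right (by simpa using hge)]
        simp
    rw [e1, e2]
    by_cases h1 : k ≥ l1.length
    · have h2 : k < l2.length := by omega
      rw [if_pos h1, if_neg (by omega : ¬ k < l1.length), if_pos h2]
      rw [PySem.List.pyGet?_natCast, List.getElem?_eq_getElem h2]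
      simp [List.getElem!_eq_getElem?_getD, List.getElem?_eq_getElem h2]
    · push Not at h1
      rw [if_neg (by omega : ¬ k ≥ l1.length), if_pos h1]
      by_cases h2 : k ≥ l2.length
      · rw [if_pos h2, if_neg (by omega : ¬ k < l2.length)]
        rw [PySem.List.pyGet?_natCast, List.getElem?_eq_getElem h1]
        simp [List.getElem!_eq_getElem?_getD, List.getElem?_eq_getElem h1]
      · push Not at h2
        rw [if_neg (by omega : ¬ k ≥ l2.length), if_pos h2]
        rw [PySem.List.pyGet?_natCast, PySem.List.pyGet?_natCast,
          List.getElem?_eq_getElem h1, List.getElem?_eq_getElem h2]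
        simp [List.getElem!_eq_getElem?_getD, List.getElem?_eq_getElem h1, List.getElem?_eq_getElem h2]
  · rw [dif_neg h]
    push Not at h
    rw [List.drop_eq_nil_of_le (by simp; omega), List.drop_eq_nil_of_le (by simp; omega)]
    simp
termination_by (l2.length - k) + (l1.length - k)
decreasing_by omega

-- ===== VERDICT (by name: the statement is the Claim_ definition above) =====
theorem gen_tuple_spec : Claim_equal_gen_tuple := by
  intro l1 l2 _
  unfold Spec_gen_tuple gen_tuple gen_tuple_alt
  simpa using gen_tuple_loop_eq l1 l2 0
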